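-- pv_equiv track=rewrite | github.com/spritz-group/BlockingCardAnalysis | Countermeasure/nfc_signal_help.py | get_mifare_classic_sequence
-- ===== SOURCE A (Python) =====
-- def get_mifare_classic_sequence(repeat_cmd=1, repeat_blck=80):
--     wupa = "52"
--     select_all = "93 20"
--     select_tag = "93 70 33 2c 51 24 6a d6 59"
--     bad = "29 88 cb e2"
--     halt = "50 00 57 cd"
--
--     wupa_response = "04 00"
--     select_all_response = "33 2c 51 24 6a"
--     select_tag_response = "08 b6 dd"
--
--     # commands running on apdu_get_data
--     cmd_sequence = [] #known
--     resp_sequence = [] #unknown by attacker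
--     sequence = [] #unknown by attacker
--     for k in range(repeat_blck):
--         cmd_sequence.append(wupa)
--         sequence.append(cmd_sequence[-1])
--
--         resp_sequence.append(wupa_response)
--         sequence.append(resp_sequence[-1])
--
--         cmd_sequence.append(select_all)
--         sequence.append(cmd_sequence[-1])
--
--         resp_sequence.append(select_all_response)
--         sequence.append(resp_sequence[-1])
--
--         cmd_sequence.append(select_tag)
--         sequence.append(cmd_sequence[-1])
--
--         resp_sequence.append(select_tag_response)
--         sequence.append(resp_sequence[-1])
--         if k != repeat_blck - 1:
--             cmd_sequence.append(bad)
--             sequence.append(cmd_sequence[-1])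
--
--             resp_sequence.append(None)
--             sequence.append(resp_sequence[-1])
--     cmd_sequence.append(halt)
--     sequence.append(cmd_sequence[-1])
--     resp_sequence.append(None)
--     sequence.append(resp_sequence[-1])
--
--     return cmd_sequence, resp_sequence, sequence
-- ===== SOURCE B (Python) =====
-- def get_mifare_classic_sequence(repeat_cmd=1, repeat_blck=80):
--     wupa = "52"
--     select_all = "93 20"
--     select_tag = "93 70 33 2c 51 24 6a d6 59"
--     bad = "29 88 cb e2"
--     halt = "50 00 57 cd"
--
--     wupa_response = "04 00"
--     select_all_response = "33 2c 51 24 6a"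
--     select_tag_response = "08 b6 dd"
--
--     cmds = [wupa, select_all, select_tag]
--     resps = [wupa_response, select_all_response, select_tag_response]
--
--     if repeat_blck > 0:
--         cmd_sequence = (cmds + [bad]) * (repeat_blck - 1) + cmds + [halt]
--         resp_sequence = (resps + [None]) * (repeat_blck - 1) + resps + [None]
--     else:
--         cmd_sequence = [halt]
--         resp_sequence = [None]
--
--     sequence = [x for pair in zip(cmd_sequence, resp_sequence) for x in pair]
--     return cmd_sequence, resp_sequence, sequence
-- ===== Notes on version B (the rewrite author's own statement) =====
-- stated objective: simpler
-- what changed: B builds cmd and resp sequences in closed form by list repetition ((block+[bad])*(n-1)+block+[halt]) instead of an appending loop, and derives the interleaved sequence afterwards in one zip pass instead of threading inline appends through the loop.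
import Mathlib
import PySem

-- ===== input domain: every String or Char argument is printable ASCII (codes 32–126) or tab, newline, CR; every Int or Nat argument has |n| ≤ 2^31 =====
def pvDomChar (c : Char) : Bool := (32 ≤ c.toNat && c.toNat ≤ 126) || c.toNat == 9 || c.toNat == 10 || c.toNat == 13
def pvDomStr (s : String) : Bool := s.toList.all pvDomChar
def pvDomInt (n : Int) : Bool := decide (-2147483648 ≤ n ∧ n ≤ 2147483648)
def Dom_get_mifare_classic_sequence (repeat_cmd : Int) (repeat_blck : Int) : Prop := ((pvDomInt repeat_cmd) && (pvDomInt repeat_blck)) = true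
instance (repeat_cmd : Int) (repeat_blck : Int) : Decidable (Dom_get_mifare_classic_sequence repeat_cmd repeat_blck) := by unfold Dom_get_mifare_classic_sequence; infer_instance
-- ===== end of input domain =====

-- B replaces A's inline-append loop by closed-form list repetition for cmd/resp and derives the
-- interleaved sequence afterwards in one zip pass (objective: simpler).

-- ===== PORT A =====
-- xs[-1] read; every such read in the port is on a list that just got an element appended (nonempty)
def pvLast (l : List (Option String)) : Option String := (PySem.List.pyGet? l (-1)).getD none

-- one iteration of A's for-loop body, state = (cmd_sequence, resp_sequence, sequence)
def pvStepA (repeat_blck : Int)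
    (st : List (Option String) × List (Option String) × List (Option String)) (k : Int) :
    List (Option String) × List (Option String) × List (Option String) :=
  let cmd := st.1 ++ [some "52"]
  let seq := st.2.2 ++ [pvLast cmd]
  let resp := st.2.1 ++ [some "04 00"]
  let seq := seq ++ [pvLast resp]
  let cmd := cmd ++ [some "93 20"]
  let seq := seq ++ [pvLast cmd]
  let resp := resp ++ [some "33 2c 51 24 6a"]
  let seq := seq ++ [pvLast resp]
  let cmd := cmd ++ [some "93 70 33 2c 51 24 6a d6 59"]
  let seq := seq ++ [pvLast cmd]
  let resp := resp ++ [some "08 b6 dd"]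
  let seq := seq ++ [pvLast resp]
  if k ≠ repeat_blck - 1 then
    let cmd := cmd ++ [some "29 88 cb e2"]
    let seq := seq ++ [pvLast cmd]
    let resp := resp ++ [none]
    let seq := seq ++ [pvLast resp]
    (cmd, resp, seq)
  else
    (cmd, resp, seq)

def get_mifare_classic_sequence (repeat_cmd : Int) (repeat_blck : Int) : List (Option String) × List (Option String) × List (Option String) :=
  let st := (PySem.List.pyRange 0 repeat_blck 1).foldl (pvStepA repeat_blck) ([], [], [])
  let cmd := st.1 ++ [some "50 00 57 cd"]
  let seq := st.2.2 ++ [pvLast cmd]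
  let resp := st.2.1 ++ [none]
  let seq := seq ++ [pvLast resp]
  (cmd, resp, seq)

-- ===== PORT B =====
-- the zip comprehension of Source B
def pvInterleave (c r : List (Option String)) : List (Option String) :=
  (c.zip r).flatMap (fun p => [p.1, p.2])

def get_mifare_classic_sequence_alt (repeat_cmd : Int) (repeat_blck : Int) : List (Option String) × List (Option String) × List (Option String) :=
  let cmds : List (Option String) := [some "52", some "93 20", some "93 70 33 2c 51 24 6a d6 59"]
  let resps : List (Option String) := [some "04 00", some "33 2c 51 24 6a", some "08 b6 dd"]
  let bad : Option String := some "29 88 cb e2"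
  let halt : Option String := some "50 00 57 cd"
  let (cmd_sequence, resp_sequence) :=
    if repeat_blck > 0 then
      ((List.replicate (repeat_blck - 1).toNat (cmds ++ [bad])).flatten ++ cmds ++ [halt],
       (List.replicate (repeat_blck - 1).toNat (resps ++ [none])).flatten ++ resps ++ [none])
    else
      ([halt], [none])
  (cmd_sequence, resp_sequence, pvInterleave cmd_sequence resp_sequence)

-- ===== PRECONDITION & SPEC =====
def Spec_get_mifare_classic_sequence (repeat_cmd : Int) (repeat_blck : Int) (out : List (Option String) × List (Option String) × List (Option String)) : Prop := out = get_mifare_classic_sequence_alt repeat_cmd repeat_blck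
instance (repeat_cmd : Int) (repeat_blck : Int) (out : List (Option String) × List (Option String) × List (Option String)) : Decidable (Spec_get_mifare_classic_sequence repeat_cmd repeat_blck out) := by unfold Spec_get_mifare_classic_sequence; infer_instance

-- ===== CLAIM (what is proved, stated in full; the proofs are below) =====
def Claim_equal_get_mifare_classic_sequence : Prop := ∀ (repeat_cmd : Int) (repeat_blck : Int), Dom_get_mifare_classic_sequence repeat_cmd repeat_blck → Spec_get_mifare_classic_sequence repeat_cmd repeat_blck (get_mifare_classic_sequence repeat_cmd repeat_blck)

-- ===== LEMMAS AND PROOFS =====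

-- the four per-block lists
def pvC4 : List (Option String) := [some "52", some "93 20", some "93 70 33 2c 51 24 6a d6 59", some "29 88 cb e2"]
def pvR4 : List (Option String) := [some "04 00", some "33 2c 51 24 6a", some "08 b6 dd", none]
def pvC3 : List (Option String) := [some "52", some "93 20", some "93 70 33 2c 51 24 6a d6 59"]
def pvR3 : List (Option String) := [some "04 00", some "33 2c 51 24 6a", some "08 b6 dd"]
def pvS8 : List (Option String) := [some "52", some "04 00", some "93 20", some "33 2c 51 24 6a", some "93 70 33 2c 51 24 6a d6 59", some "08 b6 dd", some "29 88 cb e2", none]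
def pvS6 : List (Option String) := [some "52", some "04 00", some "93 20", some "33 2c 51 24 6a", some "93 70 33 2c 51 24 6a d6 59", some "08 b6 dd"]

theorem pvLast_append (l : List (Option String)) (x : Option String) : pvLast (l ++ [x]) = x := by
  simp [pvLast, PySem.List.pyGet?_neg_one_append_singleton]

theorem pvLast_append2 (l m : List (Option String)) (x : Option String) :
    pvLast (l ++ (m ++ [x])) = x := by
  rw [← List.append_assoc]; exact pvLast_append _ _

theorem pvLast_singleton (x : Option String) : pvLast [x] = x := by
  simpa using pvLast_append [] x

theorem pvStepA_eval (n : Int) (c r s : List (Option String)) (k : Int) :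
    pvStepA n (c, r, s) k =
      if k ≠ n - 1 then (c ++ pvC4, r ++ pvR4, s ++ pvS8) else (c ++ pvC3, r ++ pvR3, s ++ pvS6) := by
  simp only [pvStepA, pvLast_append, pvC4, pvR4, pvC3, pvR3, pvS8, pvS6]
  split <;> simp

-- invariant: j full iterations (each taking the bad branch) append j copies of the block lists
theorem pvInv (n : Int) (j : Nat) (hj : (j : Int) < n) :
    (PySem.List.pyRange 0 j 1).foldl (pvStepA n) ([], [], []) =
      ((List.replicate j pvC4).flatten, (List.replicate j pvR4).flatten, (List.replicate j pvS8).flatten) := by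
  induction j with
  | zero => simp
  | succ j ih =>
      have h1 : PySem.List.pyRange 0 ((j : Int) + 1) 1 = PySem.List.pyRange 0 j 1 ++ [(j : Int)] :=
        PySem.List.pyRange_one_succ_right (by positivity)
      have hj' : (j : Int) < n := by omega
      have hne : (j : Int) ≠ n - 1 := by omega
      push_cast
      rw [h1, List.foldl_append, ih hj']
      simp [pvStepA_eval, hne, List.replicate_succ', List.flatten_append]

theorem pvInterleave_flat_append (j : Nat) (tc tr : List (Option String)) :
    pvInterleave ((List.replicate j pvC4).flatten ++ tc) ((List.replicate j pvR4).flatten ++ tr) =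
      (List.replicate j pvS8).flatten ++ pvInterleave tc tr := by
  induction j with
  | zero => simp
  | succ j ih =>
      simp only [List.replicate_succ, List.flatten_cons, List.append_assoc]
      have h4 : pvC4.length = pvR4.length := by decide
      simp only [pvInterleave] at *
      rw [List.zip_append h4, List.flatMap_append, ← List.append_assoc]
      rw [show (pvC4.zip pvR4).flatMap (fun p => [p.1, p.2]) = pvS8 from by decide]
      rw [List.append_assoc, ih]

-- ===== VERDICT (by name: the statement is the Claim_ definition above) =====
theorem get_mifare_classic_sequence_spec : Claim_equal_get_mifare_classic_sequence := by
  intro rc n _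
  unfold Spec_get_mifare_classic_sequence
  by_cases hn : n > 0
  · have h1 : PySem.List.pyRange 0 n 1 = PySem.List.pyRange 0 (n - 1) 1 ++ [n - 1] := by
      have := PySem.List.pyRange_one_succ_right (a := 0) (b := n - 1) (by omega)
      simpa using this
    have hcast : ((n - 1).toNat : Int) = n - 1 := by omega
    have hinv := pvInv n (n - 1).toNat (by omega)
    rw [hcast] at hinv
    have hA : get_mifare_classic_sequence rc n =
        ((List.replicate (n - 1).toNat pvC4).flatten ++ pvC3 ++ [some "50 00 57 cd"],
         (List.replicate (n - 1).toNat pvR4).flatten ++ pvR3 ++ [none],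
         (List.replicate (n - 1).toNat pvS8).flatten ++ pvS6 ++ [some "50 00 57 cd", none]) := by
      unfold get_mifare_classic_sequence
      rw [h1, List.foldl_append, hinv]
      simp [pvStepA_eval, pvLast_append2, List.append_assoc]
    rw [hA]
    have hz := pvInterleave_flat_append (n - 1).toNat (pvC3 ++ [some "50 00 57 cd"]) (pvR3 ++ [none])
    have htail : pvInterleave (pvC3 ++ [some "50 00 57 cd"]) (pvR3 ++ [none]) =
        pvS6 ++ [some "50 00 57 cd", none] := by decide
    rw [htail] at hz
    simp only [get_mifare_classic_sequence_alt, hn, if_true]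
    refine Prod.ext ?_ (Prod.ext ?_ ?_)
    · simp [pvC4, pvC3]
    · simp [pvR4, pvR3]
    · show (List.replicate (n - 1).toNat pvS8).flatten ++ pvS6 ++ [some "50 00 57 cd", none] = pvInterleave _ _
      rw [List.append_assoc, ← hz]
      simp [pvInterleave, pvC4, pvC3, pvR4, pvR3]
  · have h0 : PySem.List.pyRange 0 n 1 = [] := PySem.List.pyRange_one_eq_nil (by omega)
    unfold get_mifare_classic_sequence get_mifare_classic_sequence_alt
    rw [h0]
    simp [pvLast_singleton, pvInterleave, hn]
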